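-- pv_equiv track=rewrite | github.com/Rajjada001/Summer-Coding-Practice | Smart_Interviews/Todos/demo.py | optimized_calculate_less_than_counts
-- ===== SOURCE A (Python) =====
-- def optimized_calculate_less_than_counts(input_array):
--     # Create a sorted copy of the input array
--     sorted_array = sorted(input_array)
--
--     # Create a dictionary to store the count of elements less than each element
--     counts_dict = {}
--
--     for i, num in enumerate(sorted_array):
--         if i == 0:
--             counts_dict[num] = 0
--         else:
--             if num == sorted_array[i - 1]:
--                 counts_dict[num] = counts_dict[sorted_array[i - 1]]
--             else:
--                 counts_dict[num] = i
--
--     # Create the output array using the counts_dict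
--     output_array = [counts_dict[num] for num in input_array]
--
--     return output_array
-- ===== SOURCE B (Python) =====
-- def _bisect_left(a, x):
--     # standard binary search: first index whose element is >= x
--     lo, hi = 0, len(a)
--     while lo < hi:
--         mid = (lo + hi) // 2
--         if a[mid] < x:
--             lo = mid + 1
--         else:
--             hi = mid
--     return lo
--
--
-- def optimized_calculate_less_than_counts(input_array):
--     sorted_array = sorted(input_array)
--     return [_bisect_left(sorted_array, x) for x in input_array]
-- ===== Notes on version B (the rewrite author's own statement) =====
-- stated objective: simpler
-- what changed: Replaces the dict-building pass over the sorted array (with its duplicate-equality branch and per-element dict lookups) by a per-element binary search on the sorted copy, which directly yields the strictly-less count.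
import Mathlib
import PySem

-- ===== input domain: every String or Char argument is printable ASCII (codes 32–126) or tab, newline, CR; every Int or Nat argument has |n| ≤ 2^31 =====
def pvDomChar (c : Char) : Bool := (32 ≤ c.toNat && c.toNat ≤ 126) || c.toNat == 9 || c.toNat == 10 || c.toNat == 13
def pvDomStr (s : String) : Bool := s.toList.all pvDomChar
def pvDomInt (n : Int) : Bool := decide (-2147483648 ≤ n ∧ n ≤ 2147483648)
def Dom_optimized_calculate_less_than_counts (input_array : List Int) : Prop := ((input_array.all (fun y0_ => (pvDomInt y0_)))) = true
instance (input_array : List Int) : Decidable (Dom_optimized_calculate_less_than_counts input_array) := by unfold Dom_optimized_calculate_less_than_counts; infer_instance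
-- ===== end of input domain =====

-- B replaces A's dict-building pass and duplicate-equality branch by a per-element
-- binary search on the sorted copy (objective: simpler).

-- ===== PORT A =====
-- counts_dict[sorted_array[i-1]] and sorted_array[i-1]: for i ≥ 1 the index is in range and
-- the key was inserted at the previous step, so the .getD defaults never fire; likewise the
-- final counts_dict[num] lookup always finds its key (num ∈ sorted_array).
def optimized_calculate_less_than_counts (input_array : List Int) : List Int :=
  let sorted_array := PySem.List.sorted input_array (fun x => x) false
  let counts_dict : PySem.Dict Int Int :=
    (PySem.List.enumerate sorted_array 0).foldl (fun d p =>
      if p.1 = 0 then d.insert p.2 0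
      else if p.2 = (PySem.List.pyGet? sorted_array (p.1 - 1)).getD 0 then
        d.insert p.2 (d.getD ((PySem.List.pyGet? sorted_array (p.1 - 1)).getD 0) 0)
      else d.insert p.2 p.1) PySem.Dict.empty
  input_array.map (fun num => counts_dict.getD num 0)

-- ===== PORT B =====
-- _bisect_left's while loop; a[mid]: 0 ≤ lo ≤ mid < hi ≤ len a throughout, so .getD's
-- default never fires.
-- the while loop, with fuel ≥ hi - lo (the loop halves hi - lo each step, so
-- fuel = len a suffices and the fuel never runs out)
def blGo (a : List Int) (x : Int) (lo hi : Nat) : Nat → Nat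
  | 0 => lo
  | fuel + 1 =>
    if lo < hi then
      let mid := (lo + hi) / 2
      if a.getD mid 0 < x then blGo a x (mid + 1) hi fuel else blGo a x lo mid fuel
    else lo

def optimized_calculate_less_than_counts_alt (input_array : List Int) : List Int :=
  let sorted_array := PySem.List.sorted input_array (fun x => x) false
  input_array.map (fun x => (blGo sorted_array x 0 sorted_array.length sorted_array.length : Int))

-- ===== PRECONDITION & SPEC =====
def Spec_optimized_calculate_less_than_counts (input_array : List Int) (out : List Int) : Prop := out = optimized_calculate_less_than_counts_alt input_array
instance (input_array : List Int) (out : List Int) : Decidable (Spec_optimized_calculate_less_than_counts input_array out) := by unfold Spec_optimized_calculate_less_than_counts; infer_instance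

-- ===== CLAIM (what is proved, stated in full; the proofs are below) =====
def Claim_equal_optimized_calculate_less_than_counts : Prop := ∀ (input_array : List Int), Dom_optimized_calculate_less_than_counts input_array → Spec_optimized_calculate_less_than_counts input_array (optimized_calculate_less_than_counts input_array)

-- ===== LEMMAS AND PROOFS =====

-- counting by a split point: if everything before k satisfies p and nothing from k on does,
-- then countP p = k
lemma countP_split (s : List Int) (p : Int → Bool) (k : Nat) (hk : k ≤ s.length)
    (h1 : ∀ (j : Nat) (hj : j < s.length), j < k → p s[j])
    (h2 : ∀ (j : Nat) (hj : j < s.length), k ≤ j → ¬ p s[j]) :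
    s.countP p = k := by
  have hsplit := List.take_append_drop k s
  calc s.countP p = ((s.take k) ++ (s.drop k)).countP p := by rw [hsplit]
    _ = (s.take k).countP p + (s.drop k).countP p := List.countP_append
    _ = k + 0 := by
        congr 1
        · have : (s.take k).countP p = (s.take k).length := by
            rw [List.countP_eq_length]
            intro a ha
            rcases List.mem_iff_getElem.1 ha with ⟨i, hi, rfl⟩
            rw [List.getElem_take]
            have hlen : i < k := by
              have := hi; simp [List.length_take] at this; omega
            exact h1 i (by simp at hi; omega) hlen
          rw [this, List.length_take]; omega
        · rw [List.countP_eq_zero]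
          intro a ha
          rcases List.mem_iff_getElem.1 ha with ⟨i, hi, rfl⟩
          rw [List.getElem_drop]
          exact h2 (k + i) (by simp at hi; omega) (by omega)
    _ = k := by omega

-- the strictly-less count in a ≤-sorted list at a "new value" position k is exactly k
lemma countP_lt_at (s : List Int) (hp : s.Pairwise (· ≤ ·)) (k : Nat) (hk : k < s.length)
    (hne : ∀ (j : Nat) (hj : j < s.length), j + 1 = k → s[j] < s[k]) :
    s.countP (fun y => decide (y < s[k])) = k := by
  have hpg := List.pairwise_iff_getElem.1 hp
  apply countP_split s _ k (le_of_lt hk)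
  · intro j hj hjk
    simp only [decide_eq_true_eq]
    rcases Nat.lt_or_ge (j + 1) k with h | h
    · have h1 : s[j] ≤ s[k - 1] := hpg j (k-1) hj (by omega) (by omega)
      have h2 : s[k - 1] < s[k] := hne (k-1) (by omega) (by omega)
      omega
    · have : j + 1 = k := by omega
      exact hne j hj this
  · intro j hj hkj
    simp only [decide_eq_true_eq]
    rcases Nat.eq_or_lt_of_le hkj with he | hl
    · subst he; omega
    · have := hpg k j hk hj hl; omega

-- no element of a ≤-sorted list is strictly below its head position value
lemma countP_lt_head (s : List Int) (hp : s.Pairwise (· ≤ ·)) (hk : 0 < s.length) :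
    s.countP (fun y => decide (y < s[0])) = 0 := by
  have hpg := List.pairwise_iff_getElem.1 hp
  apply countP_split s _ 0 (by omega)
  · intro j hj h; omega
  · intro j hj _
    simp only [decide_eq_true_eq]
    rcases Nat.eq_zero_or_pos j with he | hl
    · subst he; omega
    · have := hpg 0 j hk hj hl; omega

-- A's dict after the fold over the first k enumerated elements: every key seen so far maps
-- to its strictly-less count in the whole sorted list
lemma foldA_getD (s : List Int) (hp : s.Pairwise (· ≤ ·)) :
    ∀ (k : Nat), k ≤ s.length → ∀ x ∈ s.take k,
      (((PySem.List.enumerate (s.take k) 0).foldl (fun d p =>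
        if p.1 = 0 then d.insert p.2 0
        else if p.2 = (PySem.List.pyGet? s (p.1 - 1)).getD 0 then
          d.insert p.2 (d.getD ((PySem.List.pyGet? s (p.1 - 1)).getD 0) 0)
        else d.insert p.2 p.1) PySem.Dict.empty).getD x 0)
      = (s.countP (fun y => decide (y < x)) : Int) := by
  have hpg := List.pairwise_iff_getElem.1 hp
  intro k
  induction k with
  | zero => intro _ x hx; simp at hx
  | succ k ih =>
    intro hk x hx
    have hk' : k < s.length := by omega
    have htake : s.take (k + 1) = s.take k ++ [s[k]] := by
      rw [List.take_add_one, List.getElem?_eq_getElem hk']; rfl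
    have hprevmem : k ≥ 1 → s[k - 1] ∈ s.take k := by
      intro h1
      rw [List.mem_iff_getElem]
      refine ⟨k - 1, by simp [List.length_take]; omega, ?_⟩
      exact List.getElem_take
    have hlen : ((s.take k).length : Int) = (k : Int) := by
      simp [List.length_take]; omega
    rw [htake, PySem.List.enumerate_append, List.foldl_append,
        PySem.List.enumerate_cons, PySem.List.enumerate_nil]
    simp only [List.foldl_cons, List.foldl_nil, hlen]
    rcases Nat.eq_zero_or_pos k with hk0 | hk1
    · -- first iteration: i == 0 branch
      subst hk0
      simp only [List.take_zero, PySem.List.enumerate_nil, List.foldl_nil]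
      norm_num
      have hx0 : x = s[0] := by
        rw [htake] at hx; simpa using hx
      subst hx0
      rw [PySem.Dict.getD_insert, if_pos rfl, countP_lt_head s hp (by omega)]
      rfl
    · -- i >= 1
      have hne0 : ((0 : Int) + k) ≠ 0 := by omega
      rw [if_neg (by omega : ¬ ((0 : Int) + (k : Int)) = 0)]
      have hcast : (0 : Int) + (k : Int) - 1 = ((k - 1 : Nat) : Int) := by omega
      have hprev : (PySem.List.pyGet? s ((0 : Int) + (k : Int) - 1)).getD 0 = s[k - 1] := by
        rw [hcast, PySem.List.pyGet?_natCast, List.getElem?_eq_getElem (by omega : k - 1 < s.length)]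
        rfl
      rw [hprev]
      have hxmem : x = s[k] ∨ x ∈ s.take k := by
        rw [htake] at hx
        rcases List.mem_append.1 hx with h | h
        · exact Or.inr h
        · exact Or.inl (by simpa using h)
      by_cases hdup : s[k] = s[k - 1]
      · rw [if_pos hdup]
        rcases hxmem with hxk | hxin
        · subst hxk
          rw [PySem.Dict.getD_insert, if_pos rfl,
              ih (by omega) _ (hprevmem hk1), ← hdup]
        · by_cases hxk : x = s[k]
          · subst hxk
            rw [PySem.Dict.getD_insert, if_pos rfl,
                ih (by omega) _ (hprevmem hk1), ← hdup]
          · rw [PySem.Dict.getD_insert, if_neg hxk, ih (by omega) _ hxin]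
      · rw [if_neg hdup]
        by_cases hxk : x = s[k]
        · subst hxk
          rw [PySem.Dict.getD_insert, if_pos rfl]
          have : s.countP (fun y => decide (y < s[k])) = k := by
            apply countP_lt_at s hp k hk'
            intro j hj hj1
            have hjk : j = k - 1 := by omega
            subst hjk
            have hle : s[k - 1] ≤ s[k] := hpg (k-1) k (by omega) hk' (by omega)
            have : s[k] ≠ s[k - 1] := hdup
            omega
          rw [this]; omega
        · have hxin : x ∈ s.take k := by
            rcases hxmem with h | h
            · exact absurd h hxk
            · exact h
          rw [PySem.Dict.getD_insert, if_neg hxk, ih (by omega) _ hxin]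

-- blGo's full-run characterization: its result r splits the sorted list at the first ≥ x position
lemma blGo_spec (a : List Int) (x : Int) (hp : a.Pairwise (· ≤ ·)) :
    ∀ fuel lo hi, hi - lo ≤ fuel → lo ≤ hi → hi ≤ a.length →
      (∀ (j : Nat) (hj : j < a.length), j < lo → a[j] < x) →
      (∀ (j : Nat) (hj : j < a.length), hi ≤ j → ¬ a[j] < x) →
      blGo a x lo hi fuel ≤ a.length ∧
      (∀ (j : Nat) (hj : j < a.length), j < blGo a x lo hi fuel → a[j] < x) ∧
      (∀ (j : Nat) (hj : j < a.length), blGo a x lo hi fuel ≤ j → ¬ a[j] < x) := by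
  have hpg := List.pairwise_iff_getElem.1 hp
  intro fuel
  induction fuel with
  | zero =>
    intro lo hi hf hlh hha h1 h2
    have heq : lo = hi := by omega
    subst heq
    simp only [blGo]
    exact ⟨by omega, h1, h2⟩
  | succ n ih =>
    intro lo hi hf hlh hha h1 h2
    by_cases hlt : lo < hi
    · rw [blGo, if_pos hlt]
      have hmlo : lo ≤ (lo + hi) / 2 := by omega
      have hmhi : (lo + hi) / 2 < hi := by omega
      have hmlen : (lo + hi) / 2 < a.length := by omega
      have hget : a.getD ((lo + hi) / 2) 0 = a[(lo + hi) / 2] :=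
        List.getD_eq_getElem a 0 hmlen
      by_cases hc : a[(lo + hi) / 2] < x
      · simp only [hget, if_pos hc]
        apply ih ((lo + hi) / 2 + 1) hi (by omega) (by omega) hha ?_ h2
        intro j hj hjlt
        rcases Nat.lt_or_ge j lo with h | h
        · exact h1 j hj h
        · rcases Nat.lt_or_ge j ((lo + hi) / 2) with h' | h'
          · have := hpg j ((lo + hi) / 2) hj hmlen h'
            omega
          · have : j = (lo + hi) / 2 := by omega
            subst this; exact hc
      · simp only [hget, if_neg hc]
        apply ih lo ((lo + hi) / 2) (by omega) (by omega) (by omega) h1 ?_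
        intro j hj hjge
        rcases Nat.lt_or_ge ((lo + hi) / 2) j with h' | h'
        · have := hpg ((lo + hi) / 2) j hmlen hj h'
          omega
        · have : j = (lo + hi) / 2 := by omega
          subst this; exact hc
    · rw [blGo, if_neg hlt]
      exact ⟨by omega, h1, fun j hj hgj => h2 j hj (by omega)⟩

-- ===== VERDICT (by name: the statement is the Claim_ definition above) =====
theorem optimized_calculate_less_than_counts_spec : Claim_equal_optimized_calculate_less_than_counts := by
  intro input_array _
  unfold Spec_optimized_calculate_less_than_counts
  unfold optimized_calculate_less_than_counts optimized_calculate_less_than_counts_alt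
  simp only []
  apply List.map_congr_left
  intro x hx
  have hp : (PySem.List.sorted input_array (fun x => x) false).Pairwise (· ≤ ·) :=
    PySem.List.sorted_pairwise input_array (fun x => x)
  set s := PySem.List.sorted input_array (fun x => x) false with hs
  have hxs : x ∈ s := (PySem.List.mem_sorted input_array (fun x => x) false x).2 hx
  have hA : _ := foldA_getD s hp s.length (le_refl _) x (by rwa [List.take_length])
  rw [List.take_length] at hA
  rw [hA]
  have hB := blGo_spec s x hp s.length 0 s.length (by omega) (by omega) (le_refl _)
    (fun j hj h => absurd h (by omega)) (fun j hj h => absurd hj (by omega))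
  have : s.countP (fun y => decide (y < x)) = blGo s x 0 s.length s.length := by
    apply countP_split s _ _ hB.1
    · intro j hj h; simpa using hB.2.1 j hj h
    · intro j hj h; simpa using hB.2.2 j hj h
  rw [this]
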